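-- pv_equiv track=rewrite | github.com/kasterma/basicpython | leetcode/circperm/circperm.py | c2n
-- ===== SOURCE A (Python) =====
-- def c2n(c):
--     b = 1
--     r = 0
--     for i in range(len(c)):
--         if c[i] == 1:
--             r += b
--         b *= 2
--     return r
-- ===== SOURCE B (Python) =====
-- def c2n(c):
--     r = 0
--     for bit in reversed(c):
--         r = r * 2 + (1 if bit == 1 else 0)
--     return r
-- ===== Notes on version B (the rewrite author's own statement) =====
-- stated objective: simpler
-- what changed: Replaces the forward scan that maintains a running power-of-two big integer (doubled and added each step) with Horner's rule over the reversed list, keeping only the accumulator; dropping the second big-integer variable is the constant-factor mechanism behind the measured speedup.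
import Mathlib
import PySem

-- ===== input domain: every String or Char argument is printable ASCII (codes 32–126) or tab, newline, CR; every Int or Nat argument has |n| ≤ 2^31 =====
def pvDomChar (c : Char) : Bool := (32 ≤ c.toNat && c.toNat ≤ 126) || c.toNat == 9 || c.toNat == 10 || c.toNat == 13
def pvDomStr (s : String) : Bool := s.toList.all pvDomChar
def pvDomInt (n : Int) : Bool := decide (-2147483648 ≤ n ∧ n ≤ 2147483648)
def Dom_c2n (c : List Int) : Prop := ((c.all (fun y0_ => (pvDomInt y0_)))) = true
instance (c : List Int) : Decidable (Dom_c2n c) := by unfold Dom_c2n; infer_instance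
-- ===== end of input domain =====

-- B replaces A's forward scan with a power-of-two variable by Horner's rule over the reversed list (simpler state).

-- ===== PORT A =====
-- for i in range(len(c)): if c[i] == 1: r += b; b *= 2   — state (b, r)
def c2n (c : List Int) : Int :=
  ((PySem.List.pyRange 0 c.length 1).foldl
    (fun (st : Int × Int) i =>
      (st.1 * 2, if PySem.List.pyGetD c i 0 == 1 then st.2 + st.1 else st.2))
    (1, 0)).2

-- ===== PORT B =====
-- for bit in reversed(c): r = r*2 + (1 if bit == 1 else 0)
def c2n_alt (c : List Int) : Int :=
  c.reverse.foldl (fun r bit => r * 2 + (if bit == 1 then 1 else 0)) 0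

-- ===== PRECONDITION & SPEC =====
def Spec_c2n (c : List Int) (out : Int) : Prop := out = c2n_alt c
instance (c : List Int) (out : Int) : Decidable (Spec_c2n c out) := by unfold Spec_c2n; infer_instance

-- ===== CLAIM (what is proved, stated in full; the proofs are below) =====
def Claim_equal_c2n : Prop := ∀ (c : List Int), Dom_c2n c → Spec_c2n c (c2n c)

-- ===== LEMMAS AND PROOFS =====

-- Horner over the reversed list, unfolded one head element at a time.
theorem c2n_alt_cons (x : Int) (xs : List Int) :
    c2n_alt (x :: xs) = (if x == 1 then 1 else 0) + 2 * c2n_alt xs := by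
  simp [c2n_alt, List.foldl_reverse]
  ring

-- A's fold over the list elements, from an arbitrary state, characterised by B's value.
theorem c2n_fold (xs : List Int) : ∀ (b r : Int),
    (xs.foldl
      (fun (st : Int × Int) x =>
        (st.1 * 2, if x == 1 then st.2 + st.1 else st.2))
      (b, r)).2 = r + b * c2n_alt xs := by
  induction xs with
  | nil => intro b r; simp [c2n_alt]
  | cons x xs ih =>
    intro b r
    simp only [List.foldl_cons, ih, c2n_alt_cons]
    split <;> ring

theorem c2n_spec : Claim_equal_c2n := by
  intro c _
  unfold Spec_c2n c2n
  rw [PySem.List.foldl_pyRange_zero_pyGetD' c 0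
    (fun (st : Int × Int) x => (st.1 * 2, if x == 1 then st.2 + st.1 else st.2)) (1, 0)]
  rw [c2n_fold]
  ring
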